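-- pv_equiv track=rewrite | github.com/btkfrank/python | packBlocks.py | packBlocks
-- ===== SOURCE A (Python) =====
-- def canFit(blocks, w, h):
--     temp = w
--     for block in blocks:
--         temp -= block
--         if temp < 0:
--             h -= 1
--             temp = w - block
--     return h > 0
--
-- def packBlocks(blocks, height):
--     l, r = min(blocks), sum(blocks)
--     while l + 1 < r:
--         mid = (l + r) // 2
--         if canFit(blocks, mid, height):
--             r = mid
--         else:
--             l = mid
--     if canFit(blocks, l, height):
--         return l
--     if canFit(blocks, r, height):
--         return r
--     return -1
-- ===== SOURCE B (Python) =====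
-- def packBlocks(blocks, height):
--     # Event-driven scan of candidate widths: the greedy row count is constant
--     # between "breakpoints" (the smallest width that would let some overflowing
--     # block join its row), so jump from breakpoint to breakpoint starting at
--     # min(blocks) and return the first width whose row count fits in `height`.
--     w = min(blocks)
--     while True:
--         rows, used, nxt = 1, 0, None
--         for b in blocks:
--             if used + b > w:
--                 rows += 1
--                 if nxt is None or used + b < nxt:
--                     nxt = used + b
--                 used = b
--             else:
--                 used += b
--         if rows <= height:
--             return w
--         if nxt is None:
--             return -1
--         w = nxt
-- ===== Notes on version B (the rewrite author's own statement) =====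
-- stated objective: alternative
-- what changed: Replaces A's binary search over candidate widths (l/r bracket, midpoint canFit probes, two fallback checks) with an event-driven breakpoint scan: one greedy packing pass per visited width computes the row count together with the smallest width at which the packing changes (min over overflowing blocks of used+block), and w jumps from breakpoint to breakpoint from min(blocks) until the rows fit, so the first feasible width is reached directly.
-- outside the precondition, e.g. on packBlocks([0, -2], 1): A returns -1, B returns 0; on packBlocks([-4, 2, -3], 1): A returns -1, B returns -2; on packBlocks([5, -3, 4], 1): A returns 6, B returns 6
import Mathlib
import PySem

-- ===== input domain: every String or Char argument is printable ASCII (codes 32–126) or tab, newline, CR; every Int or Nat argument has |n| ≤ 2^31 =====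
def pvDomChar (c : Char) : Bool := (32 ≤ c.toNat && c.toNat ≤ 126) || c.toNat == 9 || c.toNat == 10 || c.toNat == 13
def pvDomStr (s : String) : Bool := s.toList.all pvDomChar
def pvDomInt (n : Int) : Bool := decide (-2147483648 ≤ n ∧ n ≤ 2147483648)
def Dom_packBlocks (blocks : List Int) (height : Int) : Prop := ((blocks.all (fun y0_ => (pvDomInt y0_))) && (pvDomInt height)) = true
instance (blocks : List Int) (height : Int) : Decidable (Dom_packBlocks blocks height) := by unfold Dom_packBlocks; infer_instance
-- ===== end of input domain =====

-- B replaces A's binary search over candidate widths with an event-driven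
-- breakpoint scan: one greedy pass per visited width also yields the next width
-- at which the packing changes, and w jumps breakpoint to breakpoint from
-- min(blocks) until the row count fits (objective: alternative).

-- ===== PORT A =====
-- helper canFit of Source A
def canFitStep (w : Int) (s : Int × Int) (block : Int) : Int × Int :=
  if s.1 - block < 0 then (w - block, s.2 - 1) else (s.1 - block, s.2)

def canFit (blocks : List Int) (w h : Int) : Bool :=
  decide (0 < (blocks.foldl (canFitStep w) (w, h)).2)

-- the `while l + 1 < r` binary-search loop of A
def bsearchPB (blocks : List Int) (height l r : Int) : Int × Int :=
  if _h : l + 1 < r then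
    let mid := PySem.Int.floordiv (l + r) 2
    if canFit blocks mid height then bsearchPB blocks height l mid
    else bsearchPB blocks height mid r
  else (l, r)
termination_by (r - l).toNat
decreasing_by
  · have : PySem.Int.floordiv (l + r) 2 = (l + r) / 2 :=
      PySem.Int.floordiv_eq_ediv_of_pos (by norm_num)
    simp only [this]; omega
  · have : PySem.Int.floordiv (l + r) 2 = (l + r) / 2 :=
      PySem.Int.floordiv_eq_ediv_of_pos (by norm_num)
    simp only [this]; omega

def packBlocks (blocks : List Int) (height : Int) : Int :=
  let l0 := (PySem.List.min? blocks (fun x => x)).getD 0   -- min(blocks); Pre_ excludes []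
  let r0 := blocks.sum
  let lr := bsearchPB blocks height l0 r0
  if canFit blocks lr.1 height then lr.1
  else if canFit blocks lr.2 height then lr.2
  else -1

-- ===== PORT B =====
-- the `for b in blocks` body of Source B: state (rows, used, nxt)
def scanStep (w : Int) (s : Int × Int × Option Int) (b : Int) : Int × Int × Option Int :=
  if s.2.1 + b > w then
    (s.1 + 1, b,
      some (match s.2.2 with
            | none => s.2.1 + b
            | some m => if s.2.1 + b < m then s.2.1 + b else m))
  else (s.1, s.2.1 + b, s.2.2)

-- upper bound used by the termination measure of the `while True` loop: every
-- breakpoint is a contiguous-segment sum, hence at most the sum of the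
-- positive parts of the blocks (proved in scan_nxt_le below)
def posSum (blocks : List Int) : Int := (blocks.map (fun b => max b 0)).sum

-- the `while True` loop of Source B; `P` is only termination bookkeeping: at the
-- actual call P = posSum blocks and the dite guard is always true (w < m and
-- m ≤ posSum blocks hold for every breakpoint m), so no behaviour is switched
def jumpPB (blocks : List Int) (height P w : Int) : Int :=
  let s := blocks.foldl (scanStep w) (1, 0, none)
  if s.1 ≤ height then w
  else
    match s.2.2 with
    | none => -1
    | some m => if _h : w < m ∧ m ≤ P then jumpPB blocks height P m else -1
termination_by (P - w).toNat
decreasing_by omega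

def packBlocks_alt (blocks : List Int) (height : Int) : Int :=
  let lo := (PySem.List.min? blocks (fun x => x)).getD 0   -- min(blocks); Pre_ excludes []
  jumpPB blocks height (posSum blocks) lo

-- ===== PRECONDITION & SPEC =====
-- Pre_ restricts to the task's natural domain: a NONEMPTY list of NONNEGATIVE block
-- widths (any height), plus every input with height ≤ 0 (where nothing can ever fit).
-- On [] the Python A raises ValueError (min of empty list). With a negative width and
-- a positive height A still returns, but its search interval [min, sum] can exclude
-- feasible widths and canFit is no longer monotone there, so the value A picks is an
-- accident of its probe sequence (see the cites); negative widths are outside the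
-- natural domain of the packing task.
def Pre_packBlocks (blocks : List Int) (height : Int) : Prop :=
  blocks ≠ [] ∧ ((∀ b ∈ blocks, 0 ≤ b) ∨ height ≤ 0)
instance (blocks : List Int) (height : Int) : Decidable (Pre_packBlocks blocks height) := by
  unfold Pre_packBlocks; infer_instance
def pvWitness_packBlocks : List Int × Int := ([1, 2, 3], 2)

def Spec_packBlocks (blocks : List Int) (height : Int) (out : Int) : Prop := out = packBlocks_alt blocks height
instance (blocks : List Int) (height : Int) (out : Int) : Decidable (Spec_packBlocks blocks height out) := by unfold Spec_packBlocks; infer_instance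

-- ===== CLAIM (what is proved, stated in full; the proofs are below) =====
def Claim_equal_packBlocks : Prop := ∀ (blocks : List Int) (height : Int), Dom_packBlocks blocks height → Pre_packBlocks blocks height → Spec_packBlocks blocks height (packBlocks blocks height)

-- ===== LEMMAS AND PROOFS =====

-- the greedy row count at width w (proof-side abbreviation for B's fold)
def rowsAt (blocks : List Int) (w : Int) : Int :=
  (blocks.foldl (scanStep w) (1, 0, none)).1

-- A's canFit fold and B's scan fold compute the same greedy packing:
-- remaining-rows = h - (rows - r) under the correspondence temp = w - used
lemma fold_bridge (w : Int) :
    ∀ (bs : List Int) (h r u : Int) (n : Option Int),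
      (bs.foldl (canFitStep w) (w - u, h)).2
        = h - ((bs.foldl (scanStep w) (r, u, n)).1 - r) := by
  intro bs
  induction bs with
  | nil => intro h r u n; simp
  | cons b bs ih =>
    intro h r u n
    simp only [List.foldl_cons, canFitStep, scanStep]
    by_cases hb : u + b > w
    · rw [if_pos (by omega), if_pos (show u + b > w from hb)]
      have := ih (h - 1) (r + 1) b (some (match n with
            | none => u + b
            | some m => if u + b < m then u + b else m))
      simp only at this ⊢
      rw [this]; ring
    · rw [if_neg (by omega), if_neg (by simpa using hb)]
      have := ih h r (u + b) n
      have harg : w - u - b = w - (u + b) := by ring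
      rw [harg, this]

lemma canFit_iff_rows (blocks : List Int) (w h : Int) :
    canFit blocks w h = true ↔ rowsAt blocks w ≤ h := by
  unfold canFit rowsAt
  have := fold_bridge w blocks h 1 0 none
  rw [show w - 0 = w by ring] at this
  rw [this]
  simp only [decide_eq_true_eq]
  omega

-- the nxt accumulator only ever decreases (it is a running minimum)
lemma scan_nxt_mono (w : Int) :
    ∀ (bs : List Int) (r u m0 : Int),
      ∃ m, (bs.foldl (scanStep w) (r, u, some m0)).2.2 = some m ∧ m ≤ m0 := by
  intro bs
  induction bs with
  | nil => intro r u m0; exact ⟨m0, rfl, le_refl _⟩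
  | cons b bs ih =>
    intro r u m0
    simp only [List.foldl_cons, scanStep]
    by_cases hb : u + b > w
    · rw [if_pos (show u + b > w from hb)]
      obtain ⟨m, hm, hle⟩ := ih (r + 1) b (if u + b < m0 then u + b else m0)
      exact ⟨m, hm, le_trans hle (by split_ifs <;> omega)⟩
    · rw [if_neg (by simpa using hb)]
      exact ih r (u + b) m0

-- every breakpoint is strictly larger than w
lemma scan_nxt_gt (w : Int) :
    ∀ (bs : List Int) (r u : Int) (n : Option Int),
      (∀ m0, n = some m0 → w < m0) →
      ∀ m, (bs.foldl (scanStep w) (r, u, n)).2.2 = some m → w < m := by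
  intro bs
  induction bs with
  | nil => intro r u n hn m hm; exact hn m hm
  | cons b bs ih =>
    intro r u n hn
    simp only [List.foldl_cons, scanStep]
    by_cases hb : u + b > w
    · rw [if_pos (show u + b > w from hb)]
      refine ih _ _ _ ?_
      intro m0 hm0
      cases n with
      | none => simp at hm0; omega
      | some m1 =>
        have h1 := hn m1 rfl
        simp only [Option.some.injEq] at hm0
        split_ifs at hm0 <;> omega
    · rw [if_neg (by simpa using hb)]
      exact ih r (u + b) n hn

-- every breakpoint is at most max(used,0) + the positive part of the rest
lemma scan_nxt_le (w : Int) :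
    ∀ (bs : List Int) (r u : Int) (n : Option Int) (C : Int),
      (∀ m0, n = some m0 → m0 ≤ C) → max u 0 + posSum bs ≤ C →
      ∀ m, (bs.foldl (scanStep w) (r, u, n)).2.2 = some m → m ≤ C := by
  intro bs
  induction bs with
  | nil => intro r u n C hn _ m hm; exact hn m hm
  | cons b bs ih =>
    intro r u n C hn hC
    have hps : posSum (b :: bs) = max b 0 + posSum bs := by
      simp [posSum]
    rw [hps] at hC
    have hpos : 0 ≤ posSum bs := List.sum_nonneg (by
      intro x hx
      simp only [List.mem_map] at hx
      obtain ⟨y, _, rfl⟩ := hx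
      exact le_max_right y 0)
    simp only [List.foldl_cons, scanStep]
    by_cases hb : u + b > w
    · rw [if_pos (show u + b > w from hb)]
      refine ih _ _ _ C ?_ (by omega)
      intro m0 hm0
      cases n with
      | none => simp at hm0; omega
      | some m1 =>
        have h1 := hn m1 rfl
        simp only [Option.some.injEq] at hm0
        split_ifs at hm0 <;> omega
    · rw [if_neg (by simpa using hb)]
      exact ih r (u + b) n C hn (by omega)

-- between w and its smallest breakpoint the greedy packing does not change
lemma fold_agree (w v : Int) (hwv : w ≤ v) :
    ∀ (bs : List Int) (r u : Int) (nw nv : Option Int),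
      (∀ m, (bs.foldl (scanStep w) (r, u, nw)).2.2 = some m → v < m) →
      (bs.foldl (scanStep v) (r, u, nv)).1 = (bs.foldl (scanStep w) (r, u, nw)).1 ∧
      (bs.foldl (scanStep v) (r, u, nv)).2.1 = (bs.foldl (scanStep w) (r, u, nw)).2.1 := by
  intro bs
  induction bs with
  | nil => intro r u nw nv _; exact ⟨rfl, rfl⟩
  | cons b bs ih =>
    intro r u nw nv hyp
    by_cases hb : u + b > w
    · -- reset at w; the new accumulator value c' is ≤ u + b, and the final
      -- minimum is ≤ c', so the hypothesis forces u + b > v: reset at v too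
      have key : ∀ c' : Int, c' ≤ u + b →
          (∀ m, (bs.foldl (scanStep w) (r + 1, b, some c')).2.2 = some m → v < m) →
          (((b :: bs).foldl (scanStep v) (r, u, nv)).1
              = (bs.foldl (scanStep w) (r + 1, b, some c')).1 ∧
            ((b :: bs).foldl (scanStep v) (r, u, nv)).2.1
              = (bs.foldl (scanStep w) (r + 1, b, some c')).2.1) := by
        intro c' hc' htail
        obtain ⟨m, hm, hle⟩ := scan_nxt_mono w bs (r + 1) b c'
        have hvm : v < m := htail m hm
        have hbv : u + b > v := by omega
        simp only [List.foldl_cons, scanStep, if_pos (show u + b > v by omega)]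
        exact ih (r + 1) b (some c') _ htail
      cases nw with
      | none =>
        have htail : ∀ m, (bs.foldl (scanStep w) (r + 1, b, some (u + b))).2.2 = some m → v < m := by
          intro m hm
          apply hyp
          simpa only [List.foldl_cons, scanStep, if_pos (show u + b > w from hb)] using hm
        have := key (u + b) (le_refl _) htail
        refine ⟨?_, ?_⟩ <;>
          [rw [this.1]; rw [this.2]] <;>
          simp only [List.foldl_cons, scanStep, if_pos (show u + b > w from hb)]
      | some m0 =>
        have htail : ∀ m, (bs.foldl (scanStep w)
            (r + 1, b, some (if u + b < m0 then u + b else m0))).2.2 = some m → v < m := by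
          intro m hm
          apply hyp
          simpa only [List.foldl_cons, scanStep, if_pos (show u + b > w from hb)] using hm
        have := key (if u + b < m0 then u + b else m0) (by split_ifs <;> omega) htail
        refine ⟨?_, ?_⟩ <;>
          [rw [this.1]; rw [this.2]] <;>
          simp only [List.foldl_cons, scanStep, if_pos (show u + b > w from hb)]
    · have hbv : ¬ (u + b > v) := by omega
      simp only [List.foldl_cons, scanStep, if_neg (show ¬ (u + b > w) from hb),
        if_neg (show ¬ (u + b > v) from hbv)]
      apply ih
      intro m' hm'
      apply hyp
      simpa only [List.foldl_cons, scanStep, if_neg (show ¬ (u + b > w) from hb)] using hm'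

-- the jump loop reaches the first feasible width T
lemma jump_hits (blocks : List Int) (height P T : Int)
    (hTP : T ≤ P) (hT : rowsAt blocks T ≤ height) :
    ∀ (n : Nat) (w : Int), (T - w).toNat ≤ n → w ≤ T →
      (∀ v, w ≤ v → v < T → height < rowsAt blocks v) →
      jumpPB blocks height P w = T := by
  intro n
  induction n with
  | zero =>
    intro w hn hwT _
    have hw : w = T := by omega
    subst hw
    rw [jumpPB]
    rw [if_pos (by unfold rowsAt at hT; exact hT)]
  | succ n ih =>
    intro w hn hwT hinf
    rw [jumpPB]
    by_cases hfeas : (blocks.foldl (scanStep w) (1, 0, none)).1 ≤ height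
    · rw [if_pos hfeas]
      by_contra hne
      have hwlt : w < T := lt_of_le_of_ne hwT hne
      exact absurd hfeas (not_le.mpr (hinf w (le_refl _) hwlt))
    · rw [if_neg hfeas]
      have hwlt : w < T := by
        rcases lt_or_eq_of_le hwT with h | h
        · exact h
        · exfalso; subst h; exact hfeas (by unfold rowsAt at hT; exact hT)
      cases hnxt : (blocks.foldl (scanStep w) (1, 0, none)).2.2 with
      | none =>
        exfalso
        have hag := fold_agree w T (le_of_lt hwlt) blocks 1 0 none none
          (by intro m hm; rw [hnxt] at hm; cases hm)
        have : rowsAt blocks T = rowsAt blocks w := hag.1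
        unfold rowsAt at this hT
        omega
      | some m =>
        have hwm : w < m := scan_nxt_gt w blocks 1 0 none (by intro m0 h; cases h) m hnxt
        have hmT : m ≤ T := by
          by_contra hTm
          push_neg at hTm
          have hag := fold_agree w T (le_of_lt hwlt) blocks 1 0 none none
            (by intro m' hm'; rw [hnxt] at hm'; injection hm' with h; omega)
          have : rowsAt blocks T = rowsAt blocks w := hag.1
          unfold rowsAt at this hT
          omega
        show (if _h : w < m ∧ m ≤ P then jumpPB blocks height P m else -1) = T
        rw [dif_pos ⟨hwm, le_trans hmT hTP⟩]
        exact ih m (by omega) hmT (fun v hv hvT => hinf v (by omega) hvT)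

-- with every width infeasible the jump loop returns -1
lemma jump_none (blocks : List Int) (height : Int)
    (hall : ∀ v, height < rowsAt blocks v) :
    ∀ (n : Nat) (w : Int), (posSum blocks - w).toNat ≤ n →
      jumpPB blocks height (posSum blocks) w = -1 := by
  intro n
  induction n with
  | zero =>
    intro w hn
    rw [jumpPB]
    rw [if_neg (by have := hall w; unfold rowsAt at this; omega)]
    cases hnxt : (blocks.foldl (scanStep w) (1, 0, none)).2.2 with
    | none => rfl
    | some m =>
      exfalso
      have hwm : w < m := scan_nxt_gt w blocks 1 0 none (by intro m0 h; cases h) m hnxt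
      have hmP : m ≤ posSum blocks := scan_nxt_le w blocks 1 0 none (posSum blocks)
        (by intro m0 h; cases h) (by simp) m hnxt
      omega
  | succ n ih =>
    intro w hn
    rw [jumpPB]
    rw [if_neg (by have := hall w; unfold rowsAt at this; omega)]
    cases hnxt : (blocks.foldl (scanStep w) (1, 0, none)).2.2 with
    | none => rfl
    | some m =>
      have hwm : w < m := scan_nxt_gt w blocks 1 0 none (by intro m0 h; cases h) m hnxt
      have hmP : m ≤ posSum blocks := scan_nxt_le w blocks 1 0 none (posSum blocks)
        (by intro m0 h; cases h) (by simp) m hnxt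
      show (if _h : w < m ∧ m ≤ posSum blocks then jumpPB blocks height (posSum blocks) m else -1) = -1
      rw [dif_pos ⟨hwm, hmP⟩]
      exact ih m (by omega)

-- rows only ever increase along the fold, so at least one row is counted
lemma rows_ge_one (w : Int) :
    ∀ (bs : List Int) (r u : Int) (n : Option Int),
      r ≤ (bs.foldl (scanStep w) (r, u, n)).1 := by
  intro bs
  induction bs with
  | nil => intro r u n; exact le_refl _
  | cons b bs ih =>
    intro r u n
    simp only [List.foldl_cons, scanStep]
    by_cases hb : u + b > w
    · rw [if_pos (show u + b > w from hb)]
      exact le_trans (by omega) (ih (r + 1) b _)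
    · rw [if_neg hb]
      exact ih r (u + b) n

-- with room for the whole remaining sum no reset ever fires
lemma rows_no_reset (w : Int) :
    ∀ (bs : List Int) (r u : Int) (n : Option Int),
      (∀ b ∈ bs, 0 ≤ b) → u + bs.sum ≤ w →
      (bs.foldl (scanStep w) (r, u, n)).1 = r := by
  intro bs
  induction bs with
  | nil => intro r u n _ _; rfl
  | cons b bs ih =>
    intro r u n hnn hle
    have hs : 0 ≤ bs.sum := List.sum_nonneg (fun x hx => hnn x (by simp [hx]))
    simp only [List.sum_cons] at hle
    simp only [List.foldl_cons, scanStep]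
    rw [if_neg (show ¬ (u + b > w) by omega)]
    exact ih r (u + b) n (fun x hx => hnn x (by simp [hx])) (by omega)

-- with nonnegative blocks, at width = total sum everything fits in one row
lemma rows_sum_eq_one (blocks : List Int) (hnn : ∀ b ∈ blocks, 0 ≤ b) :
    rowsAt blocks blocks.sum = 1 := by
  unfold rowsAt
  exact rows_no_reset blocks.sum blocks 1 0 none hnn (by omega)

-- with nonnegative blocks posSum is the plain sum
lemma posSum_eq_sum : ∀ (blocks : List Int), (∀ b ∈ blocks, 0 ≤ b) →
    posSum blocks = blocks.sum := by
  intro blocks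
  induction blocks with
  | nil => intro _; rfl
  | cons b bs ih =>
    intro hnn
    simp only [posSum, List.map_cons, List.sum_cons] at *
    rw [max_eq_left (hnn b (by simp)), ih (fun x hx => hnn x (by simp [hx]))]

-- fold invariant for A: a wider shelf never ends with fewer remaining rows
lemma canFit_fold_mono (w w' : Int) (hw : w ≤ w') :
    ∀ (blocks : List Int), (∀ b ∈ blocks, 0 ≤ b) →
    ∀ t1 h1 t2 h2 : Int, t1 ≤ w → t2 ≤ w' →
      (h1 < h2 ∨ (h1 = h2 ∧ t1 ≤ t2)) →
      (blocks.foldl (canFitStep w) (t1, h1)).2 ≤ (blocks.foldl (canFitStep w') (t2, h2)).2 := by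
  intro blocks
  induction blocks with
  | nil => intro _ t1 h1 t2 h2 _ _ hrel; simp; omega
  | cons b bs ih =>
    intro hnn t1 h1 t2 h2 ht1 ht2 hrel
    have hb : 0 ≤ b := hnn b (by simp)
    have hnn' : ∀ x ∈ bs, 0 ≤ x := fun x hx => hnn x (by simp [hx])
    simp only [List.foldl_cons, canFitStep]
    split_ifs with h1' h2' h2' <;>
      exact ih hnn' _ _ _ _ (by omega) (by omega) (by omega)

lemma canFit_mono {blocks : List Int} (hnn : ∀ b ∈ blocks, 0 ≤ b) {w w' h : Int}
    (hw : w ≤ w') (hfit : canFit blocks w h = true) : canFit blocks w' h = true := by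
  unfold canFit at *
  have := canFit_fold_mono w w' hw blocks hnn w h w' h (le_refl _) (le_refl _)
    (Or.inr ⟨rfl, hw⟩)
  simp only [decide_eq_true_eq] at *
  omega

-- invariant of A's binary-search loop
lemma bsearchPB_inv (blocks : List Int) (height : Int) :
    ∀ (n : Nat) (l r : Int), (r - l).toNat ≤ n → l ≤ r →
      let lr := bsearchPB blocks height l r
      l ≤ lr.1 ∧ lr.1 ≤ lr.2 ∧ lr.2 ≤ r ∧ lr.2 ≤ lr.1 + 1 ∧
        (lr.1 = l ∨ canFit blocks lr.1 height = false) ∧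
        (lr.2 = r ∨ canFit blocks lr.2 height = true) := by
  intro n
  induction n with
  | zero =>
    intro l r hn hlr
    rw [bsearchPB, dif_neg (by omega)]
    exact ⟨le_refl _, hlr, le_refl _, by omega, Or.inl rfl, Or.inl rfl⟩
  | succ n ih =>
    intro l r hn hlr
    rw [bsearchPB]
    by_cases hlt : l + 1 < r
    · rw [dif_pos hlt]
      have hmid : PySem.Int.floordiv (l + r) 2 = (l + r) / 2 :=
        PySem.Int.floordiv_eq_ediv_of_pos (by norm_num)
      have hb : l < PySem.Int.floordiv (l + r) 2 ∧ PySem.Int.floordiv (l + r) 2 < r := by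
        rw [hmid]; omega
      by_cases hfit : canFit blocks (PySem.Int.floordiv (l + r) 2) height = true
      · rw [if_pos hfit]
        have h := ih l (PySem.Int.floordiv (l + r) 2) (by omega) (by omega)
        refine ⟨by omega, by omega, by omega, by omega, h.2.2.2.2.1, ?_⟩
        rcases h.2.2.2.2.2 with h' | h'
        · exact Or.inr (by rw [h']; exact hfit)
        · exact Or.inr h'
      · rw [if_neg hfit]
        have hfit' : canFit blocks (PySem.Int.floordiv (l + r) 2) height = false := by
          cases h : canFit blocks (PySem.Int.floordiv (l + r) 2) height
          · rfl
          · exact absurd h hfit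
        have h := ih (PySem.Int.floordiv (l + r) 2) r (by omega) (by omega)
        refine ⟨by omega, by omega, by omega, by omega, ?_, h.2.2.2.2.2⟩
        rcases h.2.2.2.2.1 with h' | h'
        · exact Or.inr (by rw [h']; exact hfit')
        · exact Or.inr h'
    · rw [dif_neg hlt]
      exact ⟨le_refl _, hlr, le_refl _, by omega, Or.inl rfl, Or.inl rfl⟩

-- ===== VERDICT (by name: the statement is the Claim_ definition above) =====
theorem packBlocks_spec : Claim_equal_packBlocks := by
  intro blocks height _ hpre
  obtain ⟨hne, hcase⟩ := hpre
  unfold Spec_packBlocks packBlocks packBlocks_alt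
  obtain ⟨mn, hm⟩ : ∃ mn, PySem.List.min? blocks (fun x => x) = some mn := by
    cases h : PySem.List.min? blocks (fun x => x) with
    | none => exact absurd ((PySem.List.min?_eq_none_iff blocks (fun x => x)).mp h) hne
    | some mn => exact ⟨mn, rfl⟩
  simp only [hm, Option.getD_some]
  have hall_of_np : height ≤ 0 → ∀ v, height < rowsAt blocks v := by
    intro hh v
    have := rows_ge_one v blocks 1 0 none
    unfold rowsAt
    omega
  have hcf_of_np : height ≤ 0 → ∀ w, canFit blocks w height = false := by
    intro hh w
    cases hcf : canFit blocks w height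
    · rfl
    · exact absurd ((canFit_iff_rows blocks w height).mp hcf)
        (not_le.mpr (hall_of_np hh w))
  rcases hcase with hnn | hh
  · -- nonnegative blocks
    have hmem : mn ∈ blocks := PySem.List.min?_mem hm
    have hms : mn ≤ blocks.sum := List.single_le_sum hnn mn hmem
    have hPsum : posSum blocks = blocks.sum := posSum_eq_sum blocks hnn
    have hinv := bsearchPB_inv blocks height (blocks.sum - mn).toNat mn blocks.sum
      (le_refl _) hms
    set lr := bsearchPB blocks height mn blocks.sum with hlr
    obtain ⟨h1, h2, h3, h4, h5, h6⟩ := hinv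
    by_cases hPl : canFit blocks lr.1 height = true
    · rw [if_pos hPl]
      have hl : lr.1 = mn := by
        rcases h5 with h | h
        · exact h
        · rw [hPl] at h; exact absurd h (by simp)
      have hT : rowsAt blocks mn ≤ height :=
        (canFit_iff_rows blocks mn height).mp (hl ▸ hPl)
      rw [jump_hits blocks height (posSum blocks) mn (by omega) hT 0 mn (by omega)
        (le_refl _) (fun v hv hv' => absurd hv (not_le.mpr hv'))]
      exact hl
    · rw [if_neg hPl]
      by_cases hPr : canFit blocks lr.2 height = true
      · rw [if_pos hPr]
        have hT : rowsAt blocks lr.2 ≤ height :=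
          (canFit_iff_rows blocks lr.2 height).mp hPr
        have hinf : ∀ v, mn ≤ v → v < lr.2 → height < rowsAt blocks v := by
          intro v hv hv'
          by_contra hle
          push_neg at hle
          have hfit : canFit blocks v height = true :=
            (canFit_iff_rows blocks v height).mpr hle
          exact hPl (canFit_mono hnn (show v ≤ lr.1 by omega) hfit)
        rw [jump_hits blocks height (posSum blocks) lr.2 (by omega) hT
          (lr.2 - mn).toNat mn (le_refl _) (by omega) hinf]
      · rw [if_neg hPr]
        have hr : lr.2 = blocks.sum := by
          rcases h6 with h | h
          · exact h
          · exact absurd h hPr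
        have hh : height ≤ 0 := by
          by_contra hpos
          push_neg at hpos
          exact hPr ((canFit_iff_rows blocks lr.2 height).mpr
            (by rw [hr, rows_sum_eq_one blocks hnn]; omega))
        exact (jump_none blocks height (hall_of_np hh)
          (posSum blocks - mn).toNat mn (le_refl _)).symm
  · -- height ≤ 0: nothing ever fits, both sides return -1
    rw [if_neg (by simp [hcf_of_np hh]), if_neg (by simp [hcf_of_np hh])]
    exact (jump_none blocks height (hall_of_np hh)
      (posSum blocks - mn).toNat mn (le_refl _)).symm
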